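-- pv_equiv track=rewrite | github.com/rogerberaldi/MMCyberSecurity | MMUnifiedReportGenerator.py | _generate_vulnerability_html_section
-- ===== SOURCE A (Python) =====
-- from collections import defaultdict
--
-- def _generate_vulnerability_html_section(vulnerabilities):
--     """Generate vulnerabilities section HTML"""
--     if not vulnerabilities:
--         return """
--         <section id="vulnerabilities" class="mb-5">
--             <h2><i class="fas fa-shield-alt"></i> Vulnerabilities</h2>
--             <div class="alert alert-success">
--                 <i class="fas fa-check-circle"></i> No vulnerabilities detected.
--             </div>
--         </section>
--         """
--
--     # Group vulnerabilities by severity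
--     vuln_by_severity = defaultdict(list)
--     for vuln in vulnerabilities:
--         severity = vuln.get('severity', 'info')
--         vuln_by_severity[severity].append(vuln)
--
--     vuln_html = ""
--     severity_order = ['critical', 'high', 'medium', 'low', 'info']
--
--     for severity in severity_order:
--         if severity in vuln_by_severity:
--             vuln_list = vuln_by_severity[severity]
--             vuln_html += f"""
--             <h4 class="severity-{severity} p-2 rounded">
--                 <i class="fas fa-exclamation-triangle"></i> {severity.title()} ({len(vuln_list)})
--             </h4>
--             <div class="table-responsive mb-4">
--                 <table class="table table-striped">
--                     <thead>
--                         <tr>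
--                             <th>Name</th>
--                             <th>Host</th>
--                             <th>Template ID</th>
--                             <th>Description</th>
--                         </tr>
--                     </thead>
--                     <tbody>
--             """
--
--             for vuln in vuln_list:
--                 vuln_html += f"""
--                 <tr>
--                     <td>{vuln.get('name', 'N/A')}</td>
--                     <td>{vuln.get('host', 'N/A')}</td>
--                     <td><code>{vuln.get('template_id', 'N/A')}</code></td>
--                     <td>{vuln.get('description', 'N/A')[:100]}...</td>
--                 </tr>
--                 """
--
--             vuln_html += "</tbody></table></div>"
--
--     return f"""
--     <section id="vulnerabilities" class="mb-5">
--         <h2><i class="fas fa-shield-alt"></i> Vulnerabilities</h2>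
--         <div class="collapsible-section">
--             {vuln_html}
--         </div>
--     </section>
--     """
-- ===== SOURCE B (Python) =====
-- def _generate_vulnerability_html_section(vulnerabilities):
--     """Generate vulnerabilities section HTML (recursive decomposition, no grouping dict)"""
--     if not vulnerabilities:
--         return """
--         <section id="vulnerabilities" class="mb-5">
--             <h2><i class="fas fa-shield-alt"></i> Vulnerabilities</h2>
--             <div class="alert alert-success">
--                 <i class="fas fa-check-circle"></i> No vulnerabilities detected.
--             </div>
--         </section>
--         """
--
--     def rows(vs):
--         if not vs:
--             return ""
--         v = vs[0]
--         return f"""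
--                 <tr>
--                     <td>{v.get('name', 'N/A')}</td>
--                     <td>{v.get('host', 'N/A')}</td>
--                     <td><code>{v.get('template_id', 'N/A')}</code></td>
--                     <td>{v.get('description', 'N/A')[:100]}...</td>
--                 </tr>
--                 """ + rows(vs[1:])
--
--     def render(severities):
--         if not severities:
--             return ""
--         severity = severities[0]
--         group = [v for v in vulnerabilities if v.get('severity', 'info') == severity]
--         if group:
--             block = f"""
--             <h4 class="severity-{severity} p-2 rounded">
--                 <i class="fas fa-exclamation-triangle"></i> {severity.title()} ({len(group)})
--             </h4>
--             <div class="table-responsive mb-4">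
--                 <table class="table table-striped">
--                     <thead>
--                         <tr>
--                             <th>Name</th>
--                             <th>Host</th>
--                             <th>Template ID</th>
--                             <th>Description</th>
--                         </tr>
--                     </thead>
--                     <tbody>
--             """ + rows(group) + "</tbody></table></div>"
--         else:
--             block = ""
--         return block + render(severities[1:])
--
--     return f"""
--     <section id="vulnerabilities" class="mb-5">
--         <h2><i class="fas fa-shield-alt"></i> Vulnerabilities</h2>
--         <div class="collapsible-section">
--             {render(['critical', 'high', 'medium', 'low', 'info'])}
--         </div>
--     </section>
--     """
-- ===== Notes on version B (the rewrite author's own statement) =====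
-- stated objective: alternative
-- what changed: B drops A's defaultdict grouping pass and string-accumulating loops: it recursively walks the severity order, filtering the vulnerability list per severity on demand, and builds each group's rows by structural recursion instead of A's += accumulation over a prebuilt index.
import Mathlib
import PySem

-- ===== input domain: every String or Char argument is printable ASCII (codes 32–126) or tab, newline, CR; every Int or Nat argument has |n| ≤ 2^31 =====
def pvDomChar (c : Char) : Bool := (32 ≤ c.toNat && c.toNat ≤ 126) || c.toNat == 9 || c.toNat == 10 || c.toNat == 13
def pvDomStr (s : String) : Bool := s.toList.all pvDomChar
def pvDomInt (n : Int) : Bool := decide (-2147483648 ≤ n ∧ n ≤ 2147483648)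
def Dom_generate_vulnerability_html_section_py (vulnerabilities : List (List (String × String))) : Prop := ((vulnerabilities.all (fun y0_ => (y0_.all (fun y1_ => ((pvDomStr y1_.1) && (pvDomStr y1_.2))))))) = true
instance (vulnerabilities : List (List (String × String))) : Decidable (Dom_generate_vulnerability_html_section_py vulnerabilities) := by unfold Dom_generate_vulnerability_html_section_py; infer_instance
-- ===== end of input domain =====

-- B replaces A's defaultdict grouping pass and string-accumulating loops by a recursive decomposition that
-- filters the vulnerability list per severity on demand; objective: alternative structure, same return value.

-- str.title(), ported by hand (PySem has no title): uppercase the first letter of each alphabetic run,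
-- lowercase the rest — exact on the ASCII domain (it is only applied to the severity words here)
def pvTitleGo (prev : Bool) : List Char → List Char
  | [] => []
  | c :: cs =>
    (if PySem.Chars.isalpha c then (if prev then PySem.Chars.lowerChar c else PySem.Chars.upperChar c) else c)
      :: pvTitleGo (PySem.Chars.isalpha c) cs
def pvTitle (s : String) : String := String.ofList (pvTitleGo false s.toList)

-- ===== PORT A =====
-- literal transliteration of A: defaultdict grouping fold, then a string-accumulating fold over the
-- severity order with a membership guard, then a string-accumulating fold over each group's rows
def generate_vulnerability_html_section_py (vulnerabilities : List (List (String × String))) : String :=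
  if vulnerabilities.isEmpty then
    "\n        <section id=\"vulnerabilities\" class=\"mb-5\">\n            <h2><i class=\"fas fa-shield-alt\"></i> Vulnerabilities</h2>\n            <div class=\"alert alert-success\">\n                <i class=\"fas fa-check-circle\"></i> No vulnerabilities detected.\n            </div>\n        </section>\n        "
  else
    let vuln_by_severity : PySem.Dict String (List (List (String × String))) :=
      vulnerabilities.foldl
        (fun d vuln => d.modify ((PySem.Dict.ofList vuln).getD "severity" "info") [] (· ++ [vuln]))
        PySem.Dict.empty
    let vuln_html := (["critical", "high", "medium", "low", "info"]).foldl (fun vuln_html severity =>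
      if vuln_by_severity.contains severity then
        let vuln_list := vuln_by_severity.getD severity []
        let h := vuln_html ++ ("\n            <h4 class=\"severity-" ++ severity ++ " p-2 rounded\">\n                <i class=\"fas fa-exclamation-triangle\"></i> " ++ pvTitle severity ++ " ("
          ++ PySem.Int.toStr (vuln_list.length : Int) ++ ")\n            </h4>\n            <div class=\"table-responsive mb-4\">\n                <table class=\"table table-striped\">\n                    <thead>\n                        <tr>\n                            <th>Name</th>\n                            <th>Host</th>\n                            <th>Template ID</th>\n                            <th>Description</th>\n                        </tr>\n                    </thead>\n                    <tbody>\n            ")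
        let h := vuln_list.foldl (fun h vuln =>
          h ++ ("\n                <tr>\n                    <td>" ++ (PySem.Dict.ofList vuln).getD "name" "N/A"
             ++ "</td>\n                    <td>" ++ (PySem.Dict.ofList vuln).getD "host" "N/A"
             ++ "</td>\n                    <td><code>" ++ (PySem.Dict.ofList vuln).getD "template_id" "N/A"
             ++ "</code></td>\n                    <td>" ++ PySem.Str.slice ((PySem.Dict.ofList vuln).getD "description" "N/A") none (some 100)
             ++ "...</td>\n                </tr>\n                ")) h
        h ++ "</tbody></table></div>"
      else vuln_html) ""
    "\n    <section id=\"vulnerabilities\" class=\"mb-5\">\n        <h2><i class=\"fas fa-shield-alt\"></i> Vulnerabilities</h2>\n        <div class=\"collapsible-section\">\n            " ++ vuln_html ++ "\n        </div>\n    </section>\n    "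

-- ===== PORT B =====
-- B's helper rows(vs): structural recursion producing the concatenated <tr> rows of a group
def pvRowsB : List (List (String × String)) → String
  | [] => ""
  | v :: vs =>
    ("\n                <tr>\n                    <td>" ++ (PySem.Dict.ofList v).getD "name" "N/A"
      ++ "</td>\n                    <td>" ++ (PySem.Dict.ofList v).getD "host" "N/A"
      ++ "</td>\n                    <td><code>" ++ (PySem.Dict.ofList v).getD "template_id" "N/A"
      ++ "</code></td>\n                    <td>" ++ PySem.Str.slice ((PySem.Dict.ofList v).getD "description" "N/A") none (some 100)
      ++ "...</td>\n                </tr>\n                ") ++ pvRowsB vs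

-- B's helper render(severities): recursion over the remaining severities, filtering the input on demand
def pvRenderB (vulnerabilities : List (List (String × String))) : List String → String
  | [] => ""
  | severity :: rest =>
    let group := vulnerabilities.filter (fun v => (PySem.Dict.ofList v).getD "severity" "info" == severity)
    (if group.isEmpty then ""
     else "\n            <h4 class=\"severity-" ++ severity ++ " p-2 rounded\">\n                <i class=\"fas fa-exclamation-triangle\"></i> " ++ pvTitle severity ++ " ("
       ++ PySem.Int.toStr (group.length : Int) ++ ")\n            </h4>\n            <div class=\"table-responsive mb-4\">\n                <table class=\"table table-striped\">\n                    <thead>\n                        <tr>\n                            <th>Name</th>\n                            <th>Host</th>\n                            <th>Template ID</th>\n                            <th>Description</th>\n                        </tr>\n                    </thead>\n                    <tbody>\n            " ++ pvRowsB group ++ "</tbody></table></div>")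
      ++ pvRenderB vulnerabilities rest

def generate_vulnerability_html_section_py_alt (vulnerabilities : List (List (String × String))) : String :=
  if vulnerabilities.isEmpty then
    "\n        <section id=\"vulnerabilities\" class=\"mb-5\">\n            <h2><i class=\"fas fa-shield-alt\"></i> Vulnerabilities</h2>\n            <div class=\"alert alert-success\">\n                <i class=\"fas fa-check-circle\"></i> No vulnerabilities detected.\n            </div>\n        </section>\n        "
  else
    "\n    <section id=\"vulnerabilities\" class=\"mb-5\">\n        <h2><i class=\"fas fa-shield-alt\"></i> Vulnerabilities</h2>\n        <div class=\"collapsible-section\">\n            " ++ pvRenderB vulnerabilities ["critical", "high", "medium", "low", "info"] ++ "\n        </div>\n    </section>\n    "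

-- ===== PRECONDITION & SPEC =====
def Spec_generate_vulnerability_html_section_py (vulnerabilities : List (List (String × String))) (out : String) : Prop := out = generate_vulnerability_html_section_py_alt vulnerabilities
instance (vulnerabilities : List (List (String × String))) (out : String) : Decidable (Spec_generate_vulnerability_html_section_py vulnerabilities out) := by unfold Spec_generate_vulnerability_html_section_py; infer_instance

-- ===== CLAIM =====
def Claim_equal_generate_vulnerability_html_section_py : Prop := ∀ (vulnerabilities : List (List (String × String))), Dom_generate_vulnerability_html_section_py vulnerabilities → Spec_generate_vulnerability_html_section_py vulnerabilities (generate_vulnerability_html_section_py vulnerabilities)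

-- ===== LEMMAS AND PROOFS =====

-- proof-only abbreviations for the two f-string fragments both Pythons share verbatim
def pvRowE (v : List (String × String)) : String :=
  "\n                <tr>\n                    <td>" ++ (PySem.Dict.ofList v).getD "name" "N/A"
    ++ "</td>\n                    <td>" ++ (PySem.Dict.ofList v).getD "host" "N/A"
    ++ "</td>\n                    <td><code>" ++ (PySem.Dict.ofList v).getD "template_id" "N/A"
    ++ "</code></td>\n                    <td>" ++ PySem.Str.slice ((PySem.Dict.ofList v).getD "description" "N/A") none (some 100)
    ++ "...</td>\n                </tr>\n                "
def pvHeadE (severity : String) (n : Nat) : String :=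
  "\n            <h4 class=\"severity-" ++ severity ++ " p-2 rounded\">\n                <i class=\"fas fa-exclamation-triangle\"></i> " ++ pvTitle severity ++ " (" ++ PySem.Int.toStr (n : Int) ++ ")\n            </h4>\n            <div class=\"table-responsive mb-4\">\n                <table class=\"table table-striped\">\n                    <thead>\n                        <tr>\n                            <th>Name</th>\n                            <th>Host</th>\n                            <th>Template ID</th>\n                            <th>Description</th>\n                        </tr>\n                    </thead>\n                    <tbody>\n            "

-- A's row-accumulating fold is B's recursive rows, appended to the accumulator
theorem pv_rows_foldl (g : List (List (String × String))) (a : String) :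
    g.foldl (fun h vuln => h ++ pvRowE vuln) a = a ++ pvRowsB g := by
  induction g generalizing a with
  | nil => simp [pvRowsB]
  | cons v t ih =>
    rw [List.foldl_cons, ih, pvRowsB]
    simp [pvRowE, String.append_assoc]

-- the defaultdict grouping loop: lookup of any key is the corresponding filter of the input
theorem pv_getD_groupFold (key : List (String × String) → String)
    (l : List (List (String × String))) (d : PySem.Dict String (List (List (String × String)))) (c : String) :
    (l.foldl (fun d v => d.modify (key v) [] (· ++ [v])) d).getD c []
      = d.getD c [] ++ l.filter (fun v => key v == c) := by
  induction l generalizing d with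
  | nil => simp
  | cons v t ih =>
    simp only [List.foldl_cons, ih, List.filter_cons, PySem.Dict.getD_modify]
    by_cases h : key v = c
    · subst h
      simp [List.append_assoc]
    · have hc : ¬ c = key v := fun he => h he.symm
      simp [h, hc]

-- membership in the grouping dict ↔ the filter is non-empty
theorem pv_contains_groupFold (key : List (String × String) → String)
    (l : List (List (String × String))) (c : String) :
    (l.foldl (fun d v => d.modify (key v) [] (· ++ [v])) PySem.Dict.empty).contains c
      = !(l.filter (fun v => key v == c)).isEmpty := by
  rw [PySem.Dict.contains_eq_decide_mem_keys,
      PySem.Dict.keys_foldl_modify_key l key [] (fun _ v ys => ys ++ [v]) PySem.Dict.empty]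
  by_cases hm : c ∈ l.map key
  · obtain ⟨v, hv, rfl⟩ := List.mem_map.mp hm
    have hne : (l.filter (fun w => key w == key v)) ≠ [] :=
      List.ne_nil_of_mem (List.mem_filter.mpr ⟨hv, by simp⟩)
    have h2 : (l.filter (fun w => key w == key v)).isEmpty = false := by
      simp [hne]
    simp [h2]
    exact ⟨v, hv, rfl⟩
  · have hnil : (l.filter (fun v => key v == c)) = [] := by
      rw [List.filter_eq_nil_iff]
      intro v hv hk
      exact hm (List.mem_map.mpr ⟨v, hv, beq_iff_eq.mp hk⟩)
    have h3 : ¬ ∃ a ∈ l, key a = c := by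
      rintro ⟨a, ha, rfl⟩
      exact hm (List.mem_map.mpr ⟨a, ha, rfl⟩)
    simp [hnil, h3]

-- the heart: A's string-accumulating fold over the severities is B's recursive render, appended
theorem pv_fold_main (l : List (List (String × String))) (ord : List String) (vh : String) :
    ord.foldl (fun vh s =>
        if (!(l.filter (fun v => (PySem.Dict.ofList v).getD "severity" "info" == s)).isEmpty) = true then
          ((l.filter (fun v => (PySem.Dict.ofList v).getD "severity" "info" == s)).foldl
              (fun h vuln => h ++ pvRowE vuln)
              (vh ++ pvHeadE s (l.filter (fun v => (PySem.Dict.ofList v).getD "severity" "info" == s)).length))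
            ++ "</tbody></table></div>"
        else vh) vh
      = vh ++ pvRenderB l ord := by
  induction ord generalizing vh with
  | nil => simp [pvRenderB]
  | cons s t ih =>
    rw [List.foldl_cons]
    by_cases h : (l.filter (fun v => (PySem.Dict.ofList v).getD "severity" "info" == s)).isEmpty
    · rw [if_neg (by simp [h]), ih]
      simp [pvRenderB, h]
    · rw [if_pos (by simp [h]), pv_rows_foldl, ih]
      simp [pvRenderB, h, pvHeadE, String.append_assoc]

theorem pv_fold_main' (l : List (List (String × String))) (ord : List String) :
    ord.foldl (fun vh s =>
        if (!(l.filter (fun v => (PySem.Dict.ofList v).getD "severity" "info" == s)).isEmpty) = true then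
          ((l.filter (fun v => (PySem.Dict.ofList v).getD "severity" "info" == s)).foldl
              (fun h vuln => h ++ pvRowE vuln)
              (vh ++ pvHeadE s (l.filter (fun v => (PySem.Dict.ofList v).getD "severity" "info" == s)).length))
            ++ "</tbody></table></div>"
        else vh) ""
      = pvRenderB l ord := by
  rw [pv_fold_main]
  simp

-- ===== VERDICT =====
theorem generate_vulnerability_html_section_py_spec : Claim_equal_generate_vulnerability_html_section_py := by
  intro vulnerabilities _
  unfold Spec_generate_vulnerability_html_section_py
  unfold generate_vulnerability_html_section_py generate_vulnerability_html_section_py_alt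
  cases he : vulnerabilities.isEmpty
  · simp only [if_false, Bool.false_eq_true]
    have h1 : ∀ c, (vulnerabilities.foldl
        (fun d vuln => d.modify ((PySem.Dict.ofList vuln).getD "severity" "info") [] (· ++ [vuln])) PySem.Dict.empty).getD c []
        = vulnerabilities.filter (fun v => (PySem.Dict.ofList v).getD "severity" "info" == c) := by
      intro c
      rw [pv_getD_groupFold (fun v => (PySem.Dict.ofList v).getD "severity" "info")]
      simp
    have h2 : ∀ c, (vulnerabilities.foldl
        (fun d vuln => d.modify ((PySem.Dict.ofList vuln).getD "severity" "info") [] (· ++ [vuln])) PySem.Dict.empty).contains c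
        = !(vulnerabilities.filter (fun v => (PySem.Dict.ofList v).getD "severity" "info" == c)).isEmpty :=
      pv_contains_groupFold (fun v => (PySem.Dict.ofList v).getD "severity" "info") vulnerabilities
    simp only [h1, h2]
    exact congrArg (fun x => "\n    <section id=\"vulnerabilities\" class=\"mb-5\">\n        <h2><i class=\"fas fa-shield-alt\"></i> Vulnerabilities</h2>\n        <div class=\"collapsible-section\">\n            " ++ x ++ "\n        </div>\n    </section>\n    ")
      (pv_fold_main' vulnerabilities ["critical", "high", "medium", "low", "info"])
  · simp
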